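-- pv_equiv track=rewrite | github.com/Neeraja0613/codemind-python | technex.py | time_to_get_ticket
-- ===== SOURCE A (Python) =====
-- def time_to_get_ticket(N):
--     if N == 1 or N == 3:
--         return 1
--     elif N == 2:
--         return 2
--     seconds = 0
--     while N > 3:
--         N -= 2
--         seconds += 1
--     return seconds + 1
-- ===== SOURCE B (Python) =====
-- def time_to_get_ticket(N):
--     if N == 2:
--         return 2
--     if N <= 3:
--         return 1
--     return (N - 2) // 2 + 1
-- ===== Notes on version B (the rewrite author's own statement) =====
-- stated objective: faster
-- what changed: Replaced the subtract-2 counting loop with a closed-form floor-division formula (N-2)//2+1 for N>3 and constants otherwise.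
import Mathlib
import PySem

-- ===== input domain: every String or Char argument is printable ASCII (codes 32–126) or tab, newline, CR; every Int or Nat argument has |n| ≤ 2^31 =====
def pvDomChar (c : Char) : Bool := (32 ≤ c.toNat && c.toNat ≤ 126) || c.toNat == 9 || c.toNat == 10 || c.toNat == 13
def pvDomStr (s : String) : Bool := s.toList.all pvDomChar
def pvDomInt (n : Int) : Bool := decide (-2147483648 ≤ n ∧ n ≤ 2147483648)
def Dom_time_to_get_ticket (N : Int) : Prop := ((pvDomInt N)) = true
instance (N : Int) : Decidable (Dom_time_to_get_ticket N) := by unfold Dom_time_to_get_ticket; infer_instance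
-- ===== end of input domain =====

-- B replaces A's subtract-2 counting loop by a closed-form floor-division formula (objective: faster, O(1) vs O(N)).


-- ===== PORT A =====
-- the 'while N > 3' loop of A, carrying (N, seconds); terminates because N strictly decreases while N > 3
def ticketLoop (N seconds : Int) : Int :=
  if _h : N > 3 then ticketLoop (N - 2) (seconds + 1) else seconds + 1
termination_by N.toNat
decreasing_by omega

def time_to_get_ticket (N : Int) : Int :=
  if N = 1 ∨ N = 3 then 1
  else if N = 2 then 2
  else ticketLoop N 0

-- ===== PORT B =====
def time_to_get_ticket_alt (N : Int) : Int :=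
  if N = 2 then 2
  else if N ≤ 3 then 1
  else PySem.Int.floordiv (N - 2) 2 + 1

-- ===== PRECONDITION & SPEC =====
def Spec_time_to_get_ticket (N : Int) (out : Int) : Prop := out = time_to_get_ticket_alt N
instance (N : Int) (out : Int) : Decidable (Spec_time_to_get_ticket N out) := by unfold Spec_time_to_get_ticket; infer_instance

-- ===== CLAIM (what is proved, stated in full; the proofs are below) =====
def Claim_equal_time_to_get_ticket : Prop := ∀ (N : Int), Dom_time_to_get_ticket N → Spec_time_to_get_ticket N (time_to_get_ticket N)

-- ===== LEMMAS AND PROOFS =====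

theorem ticketLoop_closed (N seconds : Int) :
    ticketLoop N seconds =
      seconds + (if N ≤ 3 then 1 else PySem.Int.floordiv (N - 2) 2 + 1) := by
  induction N, seconds using ticketLoop.induct with
  | case1 N seconds h ih =>
    rw [ticketLoop, dif_pos h, ih]
    simp only [PySem.Int.floordiv]
    rw [Int.fdiv_eq_ediv, Int.fdiv_eq_ediv]
    simp only [show ((0:Int) ≤ 2 ∨ (2:Int) ∣ (N-2)) from Or.inl (by omega), if_pos,
      show ((0:Int) ≤ 2 ∨ (2:Int) ∣ (N-2-2)) from Or.inl (by omega)]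
    omega
  | case2 N seconds h =>
    rw [ticketLoop, dif_neg h]
    omega

-- ===== VERDICT (by name: the statement is the Claim_ definition above) =====
theorem time_to_get_ticket_spec : Claim_equal_time_to_get_ticket := by
  intro N _
  unfold Spec_time_to_get_ticket time_to_get_ticket time_to_get_ticket_alt
  rcases em (N = 1 ∨ N = 3) with h | h
  · rw [if_pos h]
    rcases h with h | h <;> subst h <;> norm_num
  · rw [if_neg h]
    rcases em (N = 2) with h2 | h2
    · subst h2; norm_num
    · rw [if_neg h2, if_neg h2, ticketLoop_closed]
      split_ifs with h3
      · omega
      · omega
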